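-- pv_equiv track=rewrite | github.com/Rebeil/Performance_lab | task1/task1.py | circular_path
-- ===== SOURCE A (Python) =====
-- def circular_path(n: int, m: int):
--     circular_array = list(range(1, n + 1))
--     path = []
--     start_index = 0
--
--     while True:
--         interval = [circular_array[(start_index + i) % n] for i in range(m)]
--
--         path.append(interval[0])
--
--         if interval[-1] == circular_array[0]:
--             break
--
--         start_index = (start_index + m - 1) % n
--
--     return path
-- ===== SOURCE B (Python) =====
-- def _gcd(a, b):
--     while b:
--         a, b = b, a % b
--     return a
--
--
-- def circular_path(n: int, m: int):
--     # Closed form: starting positions are k*(m-1) mod n for k = 0, 1, ...;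
--     # the walk returns to 0 after exactly n // gcd(m-1, n) steps.
--     step = (m - 1) % n
--     t = n // _gcd(step, n)
--     return [(k * step) % n + 1 for k in range(t)]
-- ===== Notes on version B (the rewrite author's own statement) =====
-- stated objective: faster
-- what changed: B replaces A's simulation loop entirely by a closed form: the number of steps is n // gcd(m-1, n) (computed by Euclid's algorithm) and the visited starts are k*(m-1) mod n + 1, emitted by a single comprehension, so no circle list, no per-step window and no termination test are needed.
import Mathlib
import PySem

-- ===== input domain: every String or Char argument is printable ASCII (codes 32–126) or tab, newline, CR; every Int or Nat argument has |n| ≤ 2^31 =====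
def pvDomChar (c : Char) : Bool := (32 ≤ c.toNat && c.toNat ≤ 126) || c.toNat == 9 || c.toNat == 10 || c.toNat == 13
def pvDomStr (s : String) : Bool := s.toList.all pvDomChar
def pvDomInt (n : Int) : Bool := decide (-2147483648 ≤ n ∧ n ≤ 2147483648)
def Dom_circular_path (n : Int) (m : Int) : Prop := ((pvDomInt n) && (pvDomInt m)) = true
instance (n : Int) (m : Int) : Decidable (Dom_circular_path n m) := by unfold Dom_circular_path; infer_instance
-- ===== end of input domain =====

-- B replaces A's simulation loop by a closed form: the walk takes n // gcd(m-1, n) steps and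
-- visits start k*(m-1) mod n at step k, emitted by one comprehension (no circle list, no loop).

-- ===== PORT A =====
-- the 'while True' loop of A; fuel only makes it total (the loop always breaks within n steps under Pre_)
def circularStep (n m : Int) (arr : List Int) : Nat → Int → List Int → List Int
  | 0, _, path => path
  | fuel+1, start, path =>
    let interval := (PySem.List.pyRange 0 m 1).map
      (fun i => PySem.List.pyGetD arr (PySem.Int.mod (start + i) n) 0)
    let path' := path ++ [PySem.List.pyGetD interval 0 0]
    if PySem.List.pyGetD interval (-1) 0 = PySem.List.pyGetD arr 0 0 then path'
    else circularStep n m arr fuel (PySem.Int.mod (start + m - 1) n) path'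

def circular_path (n : Int) (m : Int) : List Int :=
  circularStep n m (PySem.List.pyRange 1 (n + 1) 1) (n.toNat + 1) 0 []

-- ===== PORT B =====
-- Source B's _gcd: 'while b: a, b = b, a % b'; fuel only makes it total (b strictly decreases under Pre_)
def gcdLoop : Nat → Int → Int → Int
  | 0, a, _ => a
  | fuel+1, a, b => if b = 0 then a else gcdLoop fuel b (PySem.Int.mod a b)

def pyGcd (a b : Int) : Int := gcdLoop (b.natAbs + 1) a b

def circular_path_alt (n : Int) (m : Int) : List Int :=
  let step := PySem.Int.mod (m - 1) n
  let t := PySem.Int.floordiv n (pyGcd step n)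
  (PySem.List.pyRange 0 t 1).map (fun k => PySem.Int.mod (k * step) n + 1)

-- ===== PRECONDITION & SPEC =====
-- A raises outside n ≥ 1 ∧ m ≥ 1: ZeroDivisionError for n = 0, IndexError for n < 0 or m ≤ 0.
def Pre_circular_path (n : Int) (m : Int) : Prop := 1 ≤ n ∧ 1 ≤ m
instance (n : Int) (m : Int) : Decidable (Pre_circular_path n m) := by unfold Pre_circular_path; infer_instance
def pvWitness_circular_path : Int × Int := (5, 3)

def Spec_circular_path (n : Int) (m : Int) (out : List Int) : Prop := out = circular_path_alt n m
instance (n : Int) (m : Int) (out : List Int) : Decidable (Spec_circular_path n m out) := by unfold Spec_circular_path; infer_instance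

-- ===== CLAIM (what is proved, stated in full; the proofs are below) =====
def Claim_equal_circular_path : Prop := ∀ (n : Int) (m : Int), Dom_circular_path n m → Pre_circular_path n m → Spec_circular_path n m (circular_path n m)

-- ===== LEMMAS AND PROOFS =====

-- N ∣ k*D ↔ (N / gcd D N) ∣ k, for N > 0
lemma dvd_mul_iff_div_gcd_dvd (D N k : Nat) (hN : 0 < N) :
    N ∣ k * D ↔ (N / Nat.gcd D N) ∣ k := by
  set g := Nat.gcd D N with hgdef
  have hg : 0 < g := Nat.gcd_pos_of_pos_right D hN
  have hco : Nat.Coprime (D / g) (N / g) := Nat.coprime_div_gcd_div_gcd hg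
  obtain ⟨D', hD'⟩ := Nat.gcd_dvd_left D N
  obtain ⟨N', hN'⟩ := Nat.gcd_dvd_right D N
  rw [← hgdef] at hD' hN'
  have hDg : D / g = D' := by rw [hD']; exact Nat.mul_div_cancel_left D' hg
  have hNgg : N / g = N' := by rw [hN']; exact Nat.mul_div_cancel_left N' hg
  rw [hNgg]
  have hco' : Nat.Coprime N' D' := by
    rw [hDg, hNgg] at hco; exact Nat.coprime_comm.mp hco
  constructor
  · intro h
    have h1 : N' * g ∣ (k * D') * g := by
      have hkD : k * D = (k * D') * g := by rw [hD']; ring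
      rw [← hkD, Nat.mul_comm N' g, ← hN']; exact h
    exact hco'.dvd_of_dvd_mul_right ((Nat.mul_dvd_mul_iff_right hg).mp h1)
  · intro h
    obtain ⟨c, hc⟩ := h
    rw [hN', hD', hc]; exact ⟨c * D', by ring⟩

-- arr = list(range(1, n+1)); arr[j] = j + 1 for 0 ≤ j < n
lemma arr_get (n j : Int) (h0 : 0 ≤ j) (h1 : j < n) :
    PySem.List.pyGetD (PySem.List.pyRange 1 (n + 1) 1) j 0 = j + 1 := by
  have hlen : ((PySem.List.pyRange 1 (n + 1) 1).length : Int) = n := by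
    rw [PySem.List.length_pyRange_one]; omega
  rw [PySem.List.pyGetD_eq_getElem (h0 := h0) (h1 := by omega)]
  rw [PySem.List.getElem_pyRange_one]
  omega

-- head of the interval comprehension
lemma interval_head (f : Int → Int) (m : Int) (hm : 1 ≤ m) :
    PySem.List.pyGetD ((PySem.List.pyRange 0 m 1).map f) 0 0 = f 0 := by
  rw [PySem.List.pyRange_one_cons (by omega)]
  simp [PySem.List.pyGetD_zero_cons]

-- last element of the interval comprehension
lemma interval_last (f : Int → Int) (m : Int) (hm : 1 ≤ m) :
    PySem.List.pyGetD ((PySem.List.pyRange 0 m 1).map f) (-1) 0 = f (m - 1) := by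
  have h : PySem.List.pyRange 0 m 1 = PySem.List.pyRange 0 (m - 1) 1 ++ [m - 1] := by
    have := PySem.List.pyRange_one_succ_right (a := 0) (b := m - 1) (by omega)
    simpa [show m - 1 + 1 = m by ring] using this
  rw [h, List.map_append]
  simp [PySem.List.pyGetD_neg_one_append_singleton]

-- s(k) = 0 iff the break index T = n.toNat / gcd divides k
lemma s_eq_zero_iff (n m : Int) (hn : 1 ≤ n) (hm : 1 ≤ m) (k : Nat) :
    (((k : Int) * (m - 1)) % n = 0) ↔ (n.toNat / Nat.gcd (m - 1).toNat n.toNat) ∣ k := by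
  have hD : ((m - 1).toNat : Int) = m - 1 := Int.toNat_of_nonneg (by omega)
  have hN : (n.toNat : Int) = n := Int.toNat_of_nonneg (by omega)
  rw [← dvd_mul_iff_div_gcd_dvd _ _ _ (by omega)]
  constructor
  · intro h
    have hdvd : n ∣ (k : Int) * (m - 1) := Int.dvd_of_emod_eq_zero h
    rw [← hN, ← hD, ← Int.natCast_mul, Int.natCast_dvd_natCast] at hdvd
    exact hdvd
  · intro h
    have : n ∣ (k : Int) * (m - 1) := by
      rw [← hN, ← hD, ← Int.natCast_mul, Int.natCast_dvd_natCast]; exact h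
    exact Int.emod_eq_zero_of_dvd this

-- main loop invariant: from start = (i*(m-1)) % n the loop emits exactly starts i..T-1
lemma loop_eq (n m : Int) (hn : 1 ≤ n) (hm : 1 ≤ m) :
    ∀ (fuel i : Nat) (acc : List Int),
      i < n.toNat / Nat.gcd (m - 1).toNat n.toNat →
      n.toNat / Nat.gcd (m - 1).toNat n.toNat ≤ i + fuel →
      circularStep n m (PySem.List.pyRange 1 (n + 1) 1) fuel (((i : Int) * (m - 1)) % n) acc
        = acc ++ (List.range' i (n.toNat / Nat.gcd (m - 1).toNat n.toNat - i)).map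
            (fun (k : Nat) => ((k : Int) * (m - 1)) % n + 1) := by
  intro fuel
  induction fuel with
  | zero => intro i acc h1 h2; omega
  | succ fuel ih =>
    intro i acc h1 h2
    have hn0 : (0 : Int) < n := by omega
    have hmod : ∀ a : Int, PySem.Int.mod a n = a % n :=
      fun a => PySem.Int.mod_eq_emod_of_pos hn0
    have hs0 : 0 ≤ ((i : Int) * (m - 1)) % n := Int.emod_nonneg _ (by omega)
    have hsn : ((i : Int) * (m - 1)) % n < n := Int.emod_lt_of_pos _ hn0
    have hstep : (((i : Int) * (m - 1)) % n + m - 1) % n = (((i + 1 : Nat) : Int) * (m - 1)) % n := by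
      have h0 : (((i : Int) * (m - 1)) % n + (m - 1)) % n = ((i : Int) * (m - 1) + (m - 1)) % n :=
        Int.emod_add_emod _ _ _
      have h1 : ((i : Int) * (m - 1)) % n + m - 1 = ((i : Int) * (m - 1)) % n + (m - 1) := by ring
      have h2 : (i : Int) * (m - 1) + (m - 1) = ((i + 1 : Nat) : Int) * (m - 1) := by push_cast; ring
      rw [h1, h0, h2]
    have hlast : (((i : Int) * (m - 1)) % n + (m - 1)) % n = (((i + 1 : Nat) : Int) * (m - 1)) % n := by
      have := hstep
      rwa [show ((i : Int) * (m - 1)) % n + m - 1 = ((i : Int) * (m - 1)) % n + (m - 1) by ring] at this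
    have hs10 : 0 ≤ (((i + 1 : Nat) : Int) * (m - 1)) % n := Int.emod_nonneg _ (by omega)
    have hs1n : (((i + 1 : Nat) : Int) * (m - 1)) % n < n := Int.emod_lt_of_pos _ hn0
    simp only [circularStep]
    rw [interval_head _ m hm, interval_last _ m hm]
    simp only [hmod]
    rw [show ((i : Int) * (m - 1)) % n + 0 = ((i : Int) * (m - 1)) % n by ring,
        Int.emod_emod_of_dvd _ dvd_rfl]
    rw [arr_get n _ hs0 hsn, hlast, arr_get n _ hs10 hs1n, arr_get n 0 le_rfl hn0]
    split_ifs with hbrk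
    · -- break: (i+1)*(m-1) % n = 0, so T = i+1
      have hz : (((i + 1 : Nat) : Int) * (m - 1)) % n = 0 := by omega
      have hdvd := (s_eq_zero_iff n m hn hm (i + 1)).mp hz
      have hT : n.toNat / Nat.gcd (m - 1).toNat n.toNat = i + 1 := by
        have hle := Nat.le_of_dvd (by omega) hdvd
        omega
      rw [hT, show i + 1 - i = 1 by omega]
      simp [List.range'_one]
    · -- no break: T ∤ i+1 hence i+1 < T, recurse
      have hnz : ¬ ((((i + 1 : Nat) : Int) * (m - 1)) % n = 0) := by omega
      have hndvd : ¬ (n.toNat / Nat.gcd (m - 1).toNat n.toNat) ∣ (i + 1) := by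
        intro h; exact hnz ((s_eq_zero_iff n m hn hm (i + 1)).mpr h)
      have hlt : i + 1 < n.toNat / Nat.gcd (m - 1).toNat n.toNat := by
        rcases Nat.lt_or_ge (i + 1) (n.toNat / Nat.gcd (m - 1).toNat n.toNat) with h | h
        · exact h
        · exfalso
          have : i + 1 = n.toNat / Nat.gcd (m - 1).toNat n.toNat := by omega
          exact hndvd (this ▸ dvd_rfl)
      rw [hstep, ih (i + 1) (acc ++ [((i : Int) * (m - 1)) % n + 1]) hlt (by omega)]
      rw [show n.toNat / Nat.gcd (m - 1).toNat n.toNat - i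
            = (n.toNat / Nat.gcd (m - 1).toNat n.toNat - (i + 1)) + 1 by omega]
      simp [List.range'_succ]

-- B-side: Euclid's loop computes Nat.gcd on nonnegative inputs, given enough fuel
lemma gcdLoop_eq (fuel : Nat) : ∀ (a b : Int), 0 ≤ a → 0 ≤ b → b.toNat < fuel →
    gcdLoop fuel a b = (Nat.gcd a.toNat b.toNat : Int) := by
  induction fuel with
  | zero => intro a b _ _ h; omega
  | succ fuel ih =>
    intro a b ha hb hf
    by_cases hbz : b = 0
    · subst hbz
      simp [gcdLoop, Int.toNat_of_nonneg ha]
    · have hbpos : (0 : Int) < b := by omega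
      have hmod : PySem.Int.mod a b = a % b := PySem.Int.mod_eq_emod_of_pos hbpos
      have hr0 : 0 ≤ a % b := Int.emod_nonneg _ (by omega)
      have hrb : a % b < b := Int.emod_lt_of_pos _ hbpos
      have hcast : (a % b).toNat = a.toNat % b.toNat := by
        have h1 : ((a.toNat % b.toNat : Nat) : Int) = a % b := by
          rw [Int.natCast_mod, Int.toNat_of_nonneg ha, Int.toNat_of_nonneg (le_of_lt hbpos)]
        omega
      simp only [gcdLoop, if_neg hbz, hmod]
      rw [ih b (a % b) (by omega) hr0 (by omega), hcast]
      rw [Nat.gcd_comm b.toNat, ← Nat.gcd_rec, Nat.gcd_comm]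

-- ===== VERDICT (by name: the statement is the Claim_ definition above) =====
theorem circular_path_spec : Claim_equal_circular_path := by
  intro n m _ hpre
  obtain ⟨hn, hm⟩ := hpre
  have hn0 : (0 : Int) < n := by omega
  have hG : Nat.gcd (m - 1).toNat n.toNat ∣ n.toNat := Nat.gcd_dvd_right _ _
  have hgpos : 0 < Nat.gcd (m - 1).toNat n.toNat :=
    Nat.gcd_pos_of_pos_right _ (by omega)
  have hTpos : 0 < n.toNat / Nat.gcd (m - 1).toNat n.toNat :=
    Nat.div_pos (Nat.le_of_dvd (by omega) hG) hgpos
  -- the closed form for A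
  have e1 : circular_path n m
      = (List.range' 0 (n.toNat / Nat.gcd (m - 1).toNat n.toNat)).map
          (fun (k : Nat) => ((k : Int) * (m - 1)) % n + 1) := by
    have hfuel : n.toNat / Nat.gcd (m - 1).toNat n.toNat ≤ n.toNat + 1 := by
      have := Nat.div_le_self n.toNat (Nat.gcd (m - 1).toNat n.toNat); omega
    have h := loop_eq n m hn hm (n.toNat + 1) 0 [] hTpos (by omega)
    unfold circular_path
    simpa using h
  -- the closed form for B
  have hstep_mod : PySem.Int.mod (m - 1) n = (m - 1) % n := PySem.Int.mod_eq_emod_of_pos hn0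
  have hs0 : 0 ≤ (m - 1) % n := Int.emod_nonneg _ (by omega)
  have hsn : (m - 1) % n < n := Int.emod_lt_of_pos _ hn0
  have hstepNat : ((m - 1) % n).toNat = (m - 1).toNat % n.toNat := by
    have h1 : (((m - 1).toNat % n.toNat : Nat) : Int) = (m - 1) % n := by
      rw [Int.natCast_mod, Int.toNat_of_nonneg (by omega : (0:Int) ≤ m - 1),
          Int.toNat_of_nonneg (by omega : (0:Int) ≤ n)]
    omega
  have hgcdStep : Nat.gcd ((m - 1) % n).toNat n.toNat = Nat.gcd (m - 1).toNat n.toNat := by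
    rw [hstepNat, ← Nat.gcd_rec, Nat.gcd_comm]
  have hgcd : pyGcd (PySem.Int.mod (m - 1) n) n = (Nat.gcd (m - 1).toNat n.toNat : Int) := by
    rw [hstep_mod, pyGcd, gcdLoop_eq (n.natAbs + 1) _ n hs0 (by omega) (by omega), hgcdStep]
  have ht : PySem.Int.floordiv n (pyGcd (PySem.Int.mod (m - 1) n) n)
      = ((n.toNat / Nat.gcd (m - 1).toNat n.toNat : Nat) : Int) := by
    rw [hgcd, show n = ((n.toNat : Nat) : Int) by rw [Int.toNat_of_nonneg (by omega)]]
    exact PySem.Int.floordiv_natCast _ _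
  have e2 : circular_path_alt n m
      = (List.range (n.toNat / Nat.gcd (m - 1).toNat n.toNat)).map
          (fun (k : Nat) => ((k : Int) * (m - 1)) % n + 1) := by
    show (PySem.List.pyRange 0 (PySem.Int.floordiv n (pyGcd (PySem.Int.mod (m - 1) n) n)) 1).map
        (fun k => PySem.Int.mod (k * PySem.Int.mod (m - 1) n) n + 1) = _
    rw [ht, PySem.List.pyRange_zero_natCast, List.map_map]
    refine List.map_congr_left ?_
    intro k _
    show PySem.Int.mod ((k : Int) * PySem.Int.mod (m - 1) n) n + 1 = ((k : Int) * (m - 1)) % n + 1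
    rw [hstep_mod, PySem.Int.mod_eq_emod_of_pos hn0]
    congr 1
    rw [Int.mul_emod, Int.emod_emod_of_dvd _ dvd_rfl, ← Int.mul_emod]
  unfold Spec_circular_path
  rw [e1, e2, List.range_eq_range']
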